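-- pv_equiv track=rewrite | github.com/cka304huk-m/my_teaching | 8/tasks/8.10.py | frequent_character
-- ===== SOURCE A (Python) =====
-- def frequent_character(string):
--     """Самый частый символ в строке"""
--
--     # Сортирую строку от а до я
--     # и превращаю в список.
--     my_string = sorted(string)
--
--     # Создаю словарь в него буду записывать.
--     dublicate = {}
--
--     for s in my_string:
--         if s in dublicate:
--             dublicate[s] += 1
--         else:
--             dublicate[s] = 1
--
--     return dublicate
-- ===== SOURCE B (Python) =====
-- def frequent_character(string):
--     """Самый частый символ в строке"""
--     # Sort once, then count consecutive runs with two pointers: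
--     # no per-element membership test, one dict write per distinct char.
--     chars = sorted(string)
--     result = {}
--     i, n = 0, len(chars)
--     while i < n:
--         j = i
--         while j < n and chars[j] == chars[i]:
--             j += 1
--         result[chars[i]] = j - i
--         i = j
--     return result
-- ===== Notes on version B (the rewrite author's own statement) =====
-- stated objective: alternative
-- what changed: Replaces the per-element dict membership-test-and-increment loop with a two-pointer run-length scan over the sorted list, writing each distinct character's count once.
import Mathlib
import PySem

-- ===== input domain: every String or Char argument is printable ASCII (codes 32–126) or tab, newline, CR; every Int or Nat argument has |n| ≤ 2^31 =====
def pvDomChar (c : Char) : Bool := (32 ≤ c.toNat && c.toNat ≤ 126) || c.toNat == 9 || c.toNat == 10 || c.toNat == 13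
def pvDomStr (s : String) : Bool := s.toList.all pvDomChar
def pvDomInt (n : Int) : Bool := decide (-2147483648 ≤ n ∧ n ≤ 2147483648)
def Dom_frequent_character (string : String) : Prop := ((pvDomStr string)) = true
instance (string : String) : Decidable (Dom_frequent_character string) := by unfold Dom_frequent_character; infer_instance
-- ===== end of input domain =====

-- B replaces A's per-element membership-test-and-increment dict loop with a
-- two-pointer run-length scan over the sorted characters (objective: alternative).

-- ===== PORT A =====
def frequent_character (string : String) : List (String × Int) :=
  -- my_string = sorted(string)   (iterating a Python string yields 1-char strings)
  let my_string := PySem.List.sorted (string.toList.map (fun c => String.mk [c])) (fun s => s) false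
  -- dublicate = {}; for s in my_string: if s in dublicate: dublicate[s] += 1 else: dublicate[s] = 1
  let dublicate := my_string.foldl
    (fun d s => if d.contains s then d.insert s (d.getD s 0 + 1) else d.insert s 1)
    (PySem.Dict.empty : PySem.Dict String Int)
  dublicate.items

-- ===== PORT B =====
-- the inner while loop: count and skip the run of the head character
def runsB : List String → List (String × Int)
  | [] => []
  | c :: rest =>
      let run := rest.takeWhile (fun x => x == c)
      (c, (run.length : Int) + 1) :: runsB (rest.drop run.length)
  termination_by xs => xs.length
  decreasing_by
    simp only [List.length_cons, List.length_drop]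
    omega

def frequent_character_alt (string : String) : List (String × Int) :=
  let chars := PySem.List.sorted (string.toList.map (fun c => String.mk [c])) (fun s => s) false
  runsB chars

-- ===== PRECONDITION & SPEC =====
def Spec_frequent_character (string : String) (out : List (String × Int)) : Prop := out = frequent_character_alt string
instance (string : String) (out : List (String × Int)) : Decidable (Spec_frequent_character string out) := by unfold Spec_frequent_character; infer_instance

-- ===== CLAIM (what is proved, stated in full; the proofs are below) =====
def Claim_equal_frequent_character : Prop := ∀ (string : String), Dom_frequent_character string → Spec_frequent_character string (frequent_character string)

-- ===== LEMMAS AND PROOFS =====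

-- A's loop is exactly collections.Counter's fold
lemma fold_eq_counter (xs : List String) :
    xs.foldl (fun d s => if d.contains s then d.insert s (d.getD s 0 + 1) else d.insert s 1)
      (PySem.Dict.empty : PySem.Dict String Int) = PySem.Dict.counter xs := by
  rw [← PySem.Dict.foldl_insert_getD_add_one_eq_counter]
  congr 1
  funext d s
  by_cases h : d.contains s = true
  · simp [h]
  · have h0 : d.getD s 0 = 0 :=
      PySem.Dict.getD_of_not_contains d 0 (Bool.eq_false_iff.mpr h)
    simp [h, h0]

lemma update_singleton_const (c : String) (t : List String) (ht : ∀ x ∈ t, x = c) :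
    PySem.Set.update [c] t = [c] := by
  induction t with
  | nil => rfl
  | cons a t' ih =>
      have ha : a = c := ht a (List.mem_cons_self ..)
      rw [PySem.Set.update_cons, ha, PySem.Set.add_of_mem (List.mem_singleton.mpr rfl)]
      exact ih (fun x hx => ht x (List.mem_cons_of_mem _ hx))

lemma ofList_run (c : String) (t d : List String) (ht : ∀ x ∈ t, x = c) (hd : c ∉ d) :
    PySem.Set.ofList (c :: (t ++ d)) = c :: PySem.Set.ofList d := by
  have h1 : c :: (t ++ d) = ([c] ++ t) ++ d := by simp
  have h2 : PySem.Set.ofList [c] = [c] :=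
    PySem.Set.ofList_eq_self_of_nodup [c] (List.nodup_singleton c)
  rw [h1, PySem.Set.ofList_append, PySem.Set.ofList_append, h2,
      update_singleton_const c t ht,
      PySem.Set.update_eq_append_filter]
  have hfilter : (PySem.Set.ofList d).filter (fun y => !(PySem.Set.contains [c] y)) = PySem.Set.ofList d := by
    apply List.filter_eq_self.mpr
    intro y hy
    have hyd : y ∈ d := (PySem.Set.mem_ofList d y).mp hy
    have hyc : y ≠ c := fun h => hd (h ▸ hyd)
    simp [PySem.Set.contains, hyc]
  rw [hfilter]
  rfl

-- the main invariant: on a sorted list, Counter's items are the run-length encoding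
lemma counter_items_eq_runsB (n : ℕ) : ∀ (xs : List String), xs.length ≤ n →
    xs.Pairwise (· ≤ ·) →
    (PySem.Set.ofList xs).map (fun k => (k, (xs.count k : Int))) = runsB xs := by
  induction n with
  | zero =>
      intro xs hlen _
      cases xs with
      | nil => simp [runsB]
      | cons a l => simp at hlen
  | succ m ih =>
      intro xs hlen hsorted
      cases xs with
      | nil => simp [runsB]
      | cons c rest =>
          set t := rest.takeWhile (fun x => x == c) with htdef
          set dd := rest.dropWhile (fun x => x == c) with hddef
          have hrest : t ++ dd = rest := List.takeWhile_append_dropWhile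
          have ht : ∀ x ∈ t, x = c := by
            intro x hx
            have := List.mem_takeWhile_imp hx
            exact eq_of_beq this
          have hcle : ∀ y ∈ rest, c ≤ y := (List.pairwise_cons.mp hsorted).1
          have hpw_rest : rest.Pairwise (· ≤ ·) := (List.pairwise_cons.mp hsorted).2
          have hpw_dd : dd.Pairwise (· ≤ ·) := by
            have : dd.Sublist rest := hddef ▸ List.dropWhile_sublist _
            exact hpw_rest.sublist this
          have hcd : c ∉ dd := by
            intro hmem
            cases hdd : dd with
            | nil => rw [hdd] at hmem; exact absurd hmem (List.not_mem_nil)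
            | cons e d' =>
                have he : ¬ (e == c) = true := by
                  have := List.head?_dropWhile_not (fun x => x == c) rest
                  rw [← hddef, hdd] at this
                  simpa using this
                have hec : e ≠ c := fun h => he (by simp [h])
                have hed : e ∈ rest := by
                  rw [← hrest, hdd]; exact List.mem_append_right _ (List.mem_cons_self ..)
                have hce : c ≤ e := hcle e hed
                have hclt : c < e := lt_of_le_of_ne hce (fun h => hec h.symm)
                rw [hdd] at hmem
                rcases List.mem_cons.mp hmem with h | h
                · exact hec h.symm
                · have : e ≤ c := by
                    have := (List.pairwise_cons.mp (hdd ▸ hpw_dd)).1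
                    exact this c h
                  exact absurd hclt (not_lt.mpr this)
          have hdrop : rest.drop t.length = dd := by
            conv_lhs => rw [← hrest]
            exact List.drop_left
          -- counts
          have hcount_c : (c :: rest).count c = t.length + 1 := by
            rw [List.count_cons_self, ← hrest, List.count_append]
            have h1 : t.count c = t.length := List.count_eq_length.mpr (by
              intro x hx; exact (ht x hx).symm)
            have h2 : dd.count c = 0 := List.count_eq_zero.mpr hcd
            omega
          have hcount_k : ∀ k ∈ PySem.Set.ofList dd, (c :: rest).count k = dd.count k := by
            intro k hk
            have hkd : k ∈ dd := (PySem.Set.mem_ofList dd k).mp hk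
            have hkc : k ≠ c := fun h => hcd (h ▸ hkd)
            rw [List.count_cons_of_ne (Ne.symm hkc), ← hrest, List.count_append]
            have : t.count k = 0 := List.count_eq_zero.mpr (fun hkt => hkc (ht k hkt))
            omega
          -- assemble
          have hlen_dd : dd.length ≤ m := by
            have h1 : dd.length ≤ rest.length := by
              rw [← hrest]; simp
            have h2 : rest.length + 1 ≤ m + 1 := by simpa using hlen
            omega
          have hrunsB : runsB (c :: rest)
              = (c, (t.length : Int) + 1) :: runsB dd := by
            simp only [runsB, ← htdef, hdrop]
          rw [hrunsB]
          have hofl : PySem.Set.ofList (c :: rest) = c :: PySem.Set.ofList dd := by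
            conv_lhs => rw [show rest = t ++ dd from hrest.symm]
            exact ofList_run c t dd ht hcd
          rw [hofl, List.map_cons]
          have htail : (PySem.Set.ofList dd).map (fun k => (k, ((c :: rest).count k : Int)))
              = runsB dd := by
            rw [List.map_congr_left (fun k hk => by rw [hcount_k k hk]), ih dd hlen_dd hpw_dd]
          rw [htail]
          congr 1
          have : ((c :: rest).count c : Int) = (t.length : Int) + 1 := by
            rw [hcount_c]; push_cast; ring
          rw [this]

theorem frequent_character_spec_aux (string : String) :
    frequent_character string = frequent_character_alt string := by
  simp only [frequent_character, frequent_character_alt]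
  rw [fold_eq_counter, PySem.Dict.items_counter]
  have hpw := PySem.List.sorted_pairwise
    (string.toList.map (fun c => String.mk [c])) (fun s => s)
  exact counter_items_eq_runsB _ _ le_rfl hpw

-- ===== VERDICT (by name: the statement is the Claim_ definition above) =====
theorem frequent_character_spec : Claim_equal_frequent_character := by
  intro string _
  exact frequent_character_spec_aux string
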